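-- pv_equiv track=rewrite | github.com/DianeCM/laboratory_daa | count_square_dynamic.py | count_square_dynamic
-- ===== SOURCE A (Python) =====
-- def count_square_dynamic(T:str, S:str):
--     m = len(T)
--     n = len(S)
--     if m > n: return 0
--
--     dp = [[0 for _ in range(len(S))] for _ in range(len(S))]
--     for i in range(n):
--         if i >= m or T[i] == S[0]: dp[i][i] = 2
--
--     for k in range(1, len(S)):
--         c = S[k]
--         i = 0
--         for j in range(k, n):
--             if i >= m or c == T[i]:
--                 dp[i][j] += dp[i+1][j]
--             if j >= m or c == T[j]:
--                 dp[i][j] += dp[i][j-1]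
--             i += 1
--     return dp[0][-1]
-- ===== SOURCE B (Python) =====
-- def count_square_dynamic(T: str, S: str):
--     # Top-down memoized evaluation of f(i, j) (demand-driven, iterative post-order
--     # DFS with an explicit stack) instead of A's bottom-up diagonal table sweep.
--     m = len(T)
--     n = len(S)
--     if m > n:
--         return 0
--     memo = {}
--     stack = [(0, n - 1, False)]
--     while stack:
--         i, j, resolve = stack.pop()
--         if (i, j) in memo:
--             continue
--         if i == j:
--             memo[(i, j)] = 2 if (i >= m or T[i] == S[0]) else 0
--             continue
--         c = S[j - i]
--         if not resolve:
--             stack.append((i, j, True))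
--             if i >= m or c == T[i]:
--                 stack.append((i + 1, j, False))
--             if j >= m or c == T[j]:
--                 stack.append((i, j - 1, False))
--         else:
--             res = 0
--             if i >= m or c == T[i]:
--                 res += memo[(i + 1, j)]
--             if j >= m or c == T[j]:
--                 res += memo[(i, j - 1)]
--             memo[(i, j)] = res
--     return memo[(0, n - 1)]
-- ===== Notes on version B (the rewrite author's own statement) =====
-- stated objective: alternative
-- what changed: Replaces A's bottom-up diagonal sweep over an n x n table (three nested index loops mutating dp in place) by top-down memoized evaluation: the needed cell f(0, n-1) is evaluated demand-driven by an iterative post-order DFS with an explicit stack and a memo dict, so only the cells the result actually depends on are computed.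
-- outside the precondition, e.g. on count_square_dynamic('', ''): A raises IndexError, B raises IndexError
import Mathlib
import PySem

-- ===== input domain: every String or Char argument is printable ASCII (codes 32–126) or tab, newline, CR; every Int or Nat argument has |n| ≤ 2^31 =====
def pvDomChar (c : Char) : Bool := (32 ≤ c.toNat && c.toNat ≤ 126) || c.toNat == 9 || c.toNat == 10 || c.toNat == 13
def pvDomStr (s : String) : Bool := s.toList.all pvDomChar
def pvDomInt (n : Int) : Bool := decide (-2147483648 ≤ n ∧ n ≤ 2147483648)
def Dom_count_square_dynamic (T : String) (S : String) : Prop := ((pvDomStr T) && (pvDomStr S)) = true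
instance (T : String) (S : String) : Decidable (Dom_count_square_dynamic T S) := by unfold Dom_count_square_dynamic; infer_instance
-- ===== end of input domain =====

-- B replaces A's bottom-up diagonal table sweep by demand-driven top-down memoized
-- evaluation (iterative post-order DFS with an explicit stack); return values proved equal.

-- ===== PORT A =====
-- dp[i][j] read with defaults; every access the algorithm performs is in range.
def getD2 (dp : List (List Int)) (i j : Nat) : Int := (dp.getD i []).getD j 0

def set2 (dp : List (List Int)) (i j : Nat) (v : Int) : List (List Int) :=
  dp.set i ((dp.getD i []).set j v)

-- 'if i >= m or T[i] == S[0]: dp[i][i] = 2'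
def aBaseStep (m : Nat) (Tc Sc : List Char) (dp : List (List Int)) (i : Nat) : List (List Int) :=
  if m ≤ i ∨ Tc.getD i ' ' = Sc.getD 0 ' ' then set2 dp i i 2 else dp

-- body of 'for j in range(k, n)': the state is (dp, i), i incremented at the end
def aInnerStep (m : Nat) (Tc : List Char) (c : Char) (st : List (List Int) × Nat) (j : Nat) :
    List (List Int) × Nat :=
  let dp := st.1
  let i := st.2
  let dp := if m ≤ i ∨ c = Tc.getD i ' ' then set2 dp i j (getD2 dp i j + getD2 dp (i+1) j) else dp
  let dp := if m ≤ j ∨ c = Tc.getD j ' ' then set2 dp i j (getD2 dp i j + getD2 dp i (j-1)) else dp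
  (dp, i + 1)

-- body of 'for k in range(1, len(S))'
def aDiagStep (m n : Nat) (Tc Sc : List Char) (dp : List (List Int)) (k : Nat) : List (List Int) :=
  let c := Sc.getD k ' '
  ((List.range' k (n - k)).foldl (aInnerStep m Tc c) (dp, 0)).1

def count_square_dynamic (T : String) (S : String) : Int :=
  let Tc := T.toList
  let Sc := S.toList
  let m := Tc.length
  let n := Sc.length
  if m > n then 0
  else
    let dp0 : List (List Int) := (List.range n).map (fun _ => (List.range n).map (fun _ => (0:Int)))
    let dp1 := (List.range n).foldl (aBaseStep m Tc Sc) dp0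
    let dp2 := (List.range' 1 (n - 1)).foldl (aDiagStep m n Tc Sc) dp1
    getD2 dp2 0 (n - 1)   -- dp[0][-1]; Pre_ guarantees n ≥ 1 here

-- ===== PORT B =====
-- the while loop over (stack, memo); frames are (i, j, resolve), head of the list = top of
-- the Python stack (list end); fuel only makes the loop total, the proof shows it suffices
def bRun (m : Nat) (Tc Sc : List Char) :
    Nat → List (Nat × Nat × Bool) → PySem.Dict (Nat × Nat) Int → PySem.Dict (Nat × Nat) Int
  | 0, _, memo => memo
  | _ + 1, [], memo => memo
  | f + 1, (i, j, resolve) :: rest, memo =>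
    if memo.contains (i, j) then bRun m Tc Sc f rest memo
    else if i = j then
      bRun m Tc Sc f rest
        (memo.insert (i, j) (if m ≤ i ∨ Tc.getD i ' ' = Sc.getD 0 ' ' then 2 else 0))
    else
      let c := Sc.getD (j - i) ' '
      if resolve = false then
        bRun m Tc Sc f
          ((if m ≤ j ∨ c = Tc.getD j ' ' then [(i, j - 1, false)] else []) ++
           (if m ≤ i ∨ c = Tc.getD i ' ' then [(i + 1, j, false)] else []) ++
           (i, j, true) :: rest) memo
      else
        bRun m Tc Sc f rest
          (memo.insert (i, j)
            ((if m ≤ i ∨ c = Tc.getD i ' ' then memo.getD (i + 1, j) 0 else 0) +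
             (if m ≤ j ∨ c = Tc.getD j ' ' then memo.getD (i, j - 1) 0 else 0)))

def count_square_dynamic_alt (T : String) (S : String) : Int :=
  let Tc := T.toList
  let Sc := S.toList
  let m := Tc.length
  let n := Sc.length
  if m > n then 0
  else
    (bRun m Tc Sc (3 * 2 ^ (n - 1)) [(0, n - 1, false)] PySem.Dict.empty).getD (0, n - 1) 0
    -- memo[(0, n-1)]; Pre_ guarantees n ≥ 1, the proof shows the key is present

-- ===== PRECONDITION & SPEC =====
-- Pre_ excludes only T = S = "": there A raises IndexError on dp[0][-1] (and B raises IndexError on S[-1]).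
def Pre_count_square_dynamic (T : String) (S : String) : Prop := ¬ (T = "" ∧ S = "")
instance (T : String) (S : String) : Decidable (Pre_count_square_dynamic T S) := by
  unfold Pre_count_square_dynamic; infer_instance

def pvWitness_count_square_dynamic : String × String := ("ab", "aab")

def Spec_count_square_dynamic (T : String) (S : String) (out : Int) : Prop := out = count_square_dynamic_alt T S
instance (T : String) (S : String) (out : Int) : Decidable (Spec_count_square_dynamic T S out) := by unfold Spec_count_square_dynamic; infer_instance

-- ===== CLAIM (what is proved, stated in full; the proofs are below) =====
def Claim_equal_count_square_dynamic : Prop := ∀ (T : String) (S : String), Dom_count_square_dynamic T S → Pre_count_square_dynamic T S → Spec_count_square_dynamic T S (count_square_dynamic T S)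

-- ===== LEMMAS AND PROOFS =====

-- the common mathematical value of diagonal cell dp[i][i+k]
def dVal (m : Nat) (Tc Sc : List Char) : Nat → Nat → Int
  | 0, i => if m ≤ i ∨ Tc.getD i ' ' = Sc.getD 0 ' ' then 2 else 0
  | k+1, i =>
      (if m ≤ i ∨ Sc.getD (k+1) ' ' = Tc.getD i ' ' then dVal m Tc Sc k (i+1) else 0) +
      (if m ≤ i + (k+1) ∨ Sc.getD (k+1) ' ' = Tc.getD (i+(k+1)) ' ' then dVal m Tc Sc k i else 0)

def Shape (n : Nat) (dp : List (List Int)) : Prop :=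
  dp.length = n ∧ ∀ r ∈ dp, r.length = n

lemma row_len {n : Nat} {dp : List (List Int)} (h : Shape n dp) {i : Nat} (hi : i < n) :
    (dp.getD i []).length = n := by
  obtain ⟨hl, hr⟩ := h
  have hi' : i < dp.length := by omega
  rw [List.getD_eq_getElem?_getD, List.getElem?_eq_getElem hi']
  exact hr _ (List.getElem_mem hi')

lemma shape_set2 {n : Nat} {dp : List (List Int)} (h : Shape n dp) {i : Nat} (hi : i < n)
    (j : Nat) (v : Int) : Shape n (set2 dp i j v) := by
  obtain ⟨hl, hr⟩ := h
  refine ⟨by simp [set2, hl], ?_⟩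
  intro r hrm
  rcases List.mem_or_eq_of_mem_set hrm with hm | he
  · exact hr _ hm
  · subst he; rw [List.length_set]; exact row_len ⟨hl, hr⟩ hi

lemma getD_oob {α : Type} (l : List α) (i : Nat) (d : α) (h : l.length ≤ i) :
    l.getD i d = d := by
  rw [List.getD_eq_getElem?_getD, List.getElem?_eq_none h]; rfl

lemma getD_set_eq {α : Type} (l : List α) (i : Nat) (a d : α) (h : i < l.length) :
    (l.set i a).getD i d = a := by
  rw [List.getD_eq_getElem?_getD, List.getElem?_set_self h]; rfl

lemma getD_set_ne {α : Type} (l : List α) (i i' : Nat) (a d : α) (h : i ≠ i') :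
    (l.set i a).getD i' d = l.getD i' d := by
  rw [List.getD_eq_getElem?_getD, List.getElem?_set_ne h, ← List.getD_eq_getElem?_getD]

lemma getD2_set2_self {n : Nat} {dp : List (List Int)} (h : Shape n dp) {i j : Nat}
    (hi : i < n) (hj : j < n) (v : Int) : getD2 (set2 dp i j v) i j = v := by
  have hi' : i < dp.length := by have := h.1; omega
  have hrl : (dp.getD i []).length = n := row_len h hi
  unfold getD2 set2
  rw [getD_set_eq dp i _ [] hi', getD_set_eq _ j v 0 (by omega)]

lemma getD2_set2_ne {dp : List (List Int)} {i j i' j' : Nat} (h : i ≠ i' ∨ j ≠ j') (v : Int) :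
    getD2 (set2 dp i j v) i' j' = getD2 dp i' j' := by
  unfold getD2 set2
  rcases h with h | h
  · rw [getD_set_ne dp i i' _ [] h]
  · by_cases hi : i = i'
    · subst hi
      by_cases hlen : i < dp.length
      · rw [getD_set_eq dp i _ [] hlen, getD_set_ne _ j j' v 0 h]
      · rw [List.set_eq_of_length_le (by omega)]
    · rw [getD_set_ne dp i i' _ [] hi]

lemma getD2_dp0 (n i j : Nat) :
    getD2 ((List.range n).map (fun _ => (List.range n).map (fun _ => (0:Int)))) i j = 0 := by
  unfold getD2
  by_cases hi : i < n
  · rw [PySem.List.getD_map_range _ n i [] hi]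
    by_cases hj : j < n
    · rw [PySem.List.getD_map_range _ n j 0 hj]
    · rw [getD_oob ((List.range n).map (fun _ => (0:Int))) j 0 (by simpa using hj)]
  · rw [getD_oob _ i [] (by simpa using hi)]
    rw [getD_oob ([] : List Int) j 0 (by simp)]

lemma shape_dp0 (n : Nat) :
    Shape n ((List.range n).map (fun _ => (List.range n).map (fun _ => (0:Int)))) := by
  constructor
  · simp
  · intro r hr
    rcases List.mem_map.1 hr with ⟨x, _, he⟩
    simp [← he]

-- A's base loop
lemma baseFold (m n : Nat) (Tc Sc : List Char) (t : Nat) (ht : t ≤ n) :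
    Shape n ((List.range t).foldl (aBaseStep m Tc Sc)
        ((List.range n).map (fun _ => (List.range n).map (fun _ => (0:Int))))) ∧
    ∀ i j, getD2 ((List.range t).foldl (aBaseStep m Tc Sc)
        ((List.range n).map (fun _ => (List.range n).map (fun _ => (0:Int))))) i j =
      if i = j ∧ i < t then dVal m Tc Sc 0 i else 0 := by
  induction t with
  | zero =>
    refine ⟨shape_dp0 n, ?_⟩
    intro i j
    simp only [List.range_zero, List.foldl_nil]
    rw [getD2_dp0]
    simp
  | succ t ih =>
    obtain ⟨hs, hv⟩ := ih (by omega)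
    rw [List.range_succ, List.foldl_append, List.foldl_cons, List.foldl_nil]
    set dpt := (List.range t).foldl (aBaseStep m Tc Sc)
      ((List.range n).map (fun _ => (List.range n).map (fun _ => (0:Int)))) with hdp
    clear hdp
    unfold aBaseStep
    by_cases hc : m ≤ t ∨ Tc.getD t ' ' = Sc.getD 0 ' '
    · rw [if_pos hc]
      refine ⟨shape_set2 hs (by omega) _ _, ?_⟩
      intro i j
      by_cases hij : i = t ∧ j = t
      · obtain ⟨hi, hj⟩ := hij
        rw [hi, hj, getD2_set2_self hs (by omega) (by omega), if_pos (by omega)]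
        simp only [dVal]
        rw [if_pos hc]
      · rw [getD2_set2_ne (by omega) 2, hv i j]
        by_cases h1 : i = j ∧ i < t
        · rw [if_pos h1, if_pos (by omega)]
        · rw [if_neg h1, if_neg (by omega)]
    · rw [if_neg hc]
      refine ⟨hs, ?_⟩
      intro i j
      rw [hv i j]
      by_cases h1 : i = j ∧ i < t
      · rw [if_pos h1, if_pos (by omega)]
      · by_cases h2 : i = t ∧ j = t
        · rw [if_neg h1, if_pos (by omega), h2.1]
          simp only [dVal]
          rw [if_neg hc]
        · rw [if_neg h1, if_neg (by omega)]

-- one execution of the inner-loop body on diagonal k (cell (t, k+t))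
lemma innerStep (m n : Nat) (Tc Sc : List Char) (k : Nat) (hk1 : 1 ≤ k) (hkn : k < n)
    (t : Nat) (htn : t < n - k) (dp : List (List Int)) (hs : Shape n dp)
    (hv : ∀ i j, getD2 dp i j =
      if i ≤ j ∧ j < n ∧ (j - i < k ∨ (j - i = k ∧ i < t)) then dVal m Tc Sc (j-i) i else 0) :
    (aInnerStep m Tc (Sc.getD k ' ') (dp, t) (k+t)).2 = t + 1 ∧
    Shape n (aInnerStep m Tc (Sc.getD k ' ') (dp, t) (k+t)).1 ∧
    ∀ i j, getD2 (aInnerStep m Tc (Sc.getD k ' ') (dp, t) (k+t)).1 i j =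
      if i ≤ j ∧ j < n ∧ (j - i < k ∨ (j - i = k ∧ i < t+1)) then dVal m Tc Sc (j-i) i else 0 := by
  obtain ⟨k', rfl⟩ : ∃ k', k = k' + 1 := ⟨k - 1, by omega⟩
  have e1 : getD2 dp t (k'+1+t) = 0 := by
    rw [hv t (k'+1+t), if_neg (by omega)]
  have e2 : getD2 dp (t+1) (k'+1+t) = dVal m Tc Sc k' (t+1) := by
    rw [hv (t+1) (k'+1+t), if_pos (by omega)]
    congr 1
    omega
  have e3 : getD2 dp t (k'+1+t-1) = dVal m Tc Sc k' t := by
    rw [hv t (k'+1+t-1), if_pos (by omega)]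
    congr 1
    omega
  simp only [aInnerStep]
  set dp1 := (if m ≤ t ∨ Sc.getD (k'+1) ' ' = Tc.getD t ' ' then
      set2 dp t (k'+1+t) (getD2 dp t (k'+1+t) + getD2 dp (t+1) (k'+1+t)) else dp) with hdp1
  have hs1 : Shape n dp1 := by
    rw [hdp1]; split_ifs
    · exact shape_set2 hs (by omega) _ _
    · exact hs
  have g1 : getD2 dp1 t (k'+1+t) =
      if m ≤ t ∨ Sc.getD (k'+1) ' ' = Tc.getD t ' ' then dVal m Tc Sc k' (t+1) else 0 := by
    rw [hdp1]; split_ifs with h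
    · rw [getD2_set2_self hs (by omega) (by omega), e1, e2, zero_add]
    · rw [hv t (k'+1+t), if_neg (by omega)]
  have g2 : ∀ i j, ¬(i = t ∧ j = k'+1+t) → getD2 dp1 i j = getD2 dp i j := by
    intro i j hij
    rw [hdp1]; split_ifs with h
    · rw [getD2_set2_ne (by omega) _]
    · rfl
  set dp2 := (if m ≤ k'+1+t ∨ Sc.getD (k'+1) ' ' = Tc.getD (k'+1+t) ' ' then
      set2 dp1 t (k'+1+t) (getD2 dp1 t (k'+1+t) + getD2 dp1 t (k'+1+t-1)) else dp1) with hdp2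
  have hs2 : Shape n dp2 := by
    rw [hdp2]; split_ifs
    · exact shape_set2 hs1 (by omega) _ _
    · exact hs1
  have g3 : getD2 dp2 t (k'+1+t) =
      (if m ≤ t ∨ Sc.getD (k'+1) ' ' = Tc.getD t ' ' then dVal m Tc Sc k' (t+1) else 0) +
      (if m ≤ k'+1+t ∨ Sc.getD (k'+1) ' ' = Tc.getD (k'+1+t) ' ' then dVal m Tc Sc k' t else 0) := by
    by_cases h : m ≤ k'+1+t ∨ Sc.getD (k'+1) ' ' = Tc.getD (k'+1+t) ' '
    · rw [hdp2, if_pos h, getD2_set2_self hs1 (by omega) (by omega),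
        g2 t (k'+1+t-1) (by omega), e3, g1, if_pos h]
    · rw [hdp2, if_neg h, g1, if_neg h, add_zero]
  have g4 : ∀ i j, ¬(i = t ∧ j = k'+1+t) → getD2 dp2 i j = getD2 dp i j := by
    intro i j hij
    rw [hdp2]; split_ifs with h
    · rw [getD2_set2_ne (by omega) _, g2 i j hij]
    · exact g2 i j hij
  refine ⟨trivial, hs2, ?_⟩
  intro i j
  by_cases hij : i = t ∧ j = k'+1+t
  · rw [hij.1, hij.2, g3,
      if_pos (show t ≤ k'+1+t ∧ k'+1+t < n ∧
        (k'+1+t-t < k'+1 ∨ (k'+1+t-t = k'+1 ∧ t < t+1)) from by omega),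
      show k'+1+t-t = k'+1 from by omega]
    simp only [dVal]
    rw [show t + (k'+1) = k'+1+t from by omega]
  · rw [g4 i j hij, hv i j]
    by_cases hr : i ≤ j ∧ j < n ∧ (j - i < k'+1 ∨ (j - i = k'+1 ∧ i < t))
    · rw [if_pos hr, if_pos (by omega)]
    · rw [if_neg hr, if_neg (by omega)]

-- A's inner loop over one diagonal
lemma innerFold (m n : Nat) (Tc Sc : List Char) (k : Nat) (hk1 : 1 ≤ k) (hkn : k < n)
    (dp : List (List Int)) (hs : Shape n dp)
    (hinv : ∀ i j, getD2 dp i j =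
      if i ≤ j ∧ j < n ∧ j - i < k then dVal m Tc Sc (j-i) i else 0)
    (t : Nat) (ht : t ≤ n - k) :
    ((List.range' k t).foldl (aInnerStep m Tc (Sc.getD k ' ')) (dp, 0)).2 = t ∧
    Shape n ((List.range' k t).foldl (aInnerStep m Tc (Sc.getD k ' ')) (dp, 0)).1 ∧
    ∀ i j, getD2 ((List.range' k t).foldl (aInnerStep m Tc (Sc.getD k ' ')) (dp, 0)).1 i j =
      if i ≤ j ∧ j < n ∧ (j - i < k ∨ (j - i = k ∧ i < t)) then dVal m Tc Sc (j-i) i else 0 := by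
  induction t with
  | zero =>
    simp only [List.range'_zero, List.foldl_nil]
    refine ⟨trivial, hs, ?_⟩
    intro i j
    rw [hinv i j]
    by_cases h1 : i ≤ j ∧ j < n ∧ j - i < k
    · rw [if_pos h1, if_pos (by omega)]
    · rw [if_neg h1, if_neg (by omega)]
  | succ t ih =>
    obtain ⟨hi2, hs2, hv2⟩ := ih (by omega)
    rw [List.range'_1_concat, List.foldl_append, List.foldl_cons, List.foldl_nil]
    set st := (List.range' k t).foldl (aInnerStep m Tc (Sc.getD k ' ')) (dp, 0) with hst
    clear hst
    have hpair : st = (st.1, t) := by rw [← hi2]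
    rw [hpair]
    exact innerStep m n Tc Sc k hk1 hkn t (by omega) st.1 hs2 hv2

-- A's outer loop
lemma outerFold (m n : Nat) (Tc Sc : List Char) (dp1 : List (List Int)) (hs : Shape n dp1)
    (hinv : ∀ i j, getD2 dp1 i j = if i = j ∧ i < n then dVal m Tc Sc 0 i else 0)
    (t : Nat) (ht : t ≤ n - 1) :
    Shape n ((List.range' 1 t).foldl (aDiagStep m n Tc Sc) dp1) ∧
    ∀ i j, getD2 ((List.range' 1 t).foldl (aDiagStep m n Tc Sc) dp1) i j =
      if i ≤ j ∧ j < n ∧ j - i ≤ t then dVal m Tc Sc (j-i) i else 0 := by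
  induction t with
  | zero =>
    simp only [List.range'_zero, List.foldl_nil]
    refine ⟨hs, ?_⟩
    intro i j
    rw [hinv i j]
    by_cases h1 : i = j ∧ i < n
    · rw [if_pos h1, if_pos (by omega), show j - i = 0 from by omega]
    · rw [if_neg h1, if_neg (by omega)]
  | succ t ih =>
    obtain ⟨hs2, hv2⟩ := ih (by omega)
    rw [List.range'_1_concat, List.foldl_append, List.foldl_cons, List.foldl_nil]
    set dpt := (List.range' 1 t).foldl (aDiagStep m n Tc Sc) dp1 with hdpt
    clear hdpt
    simp only [aDiagStep]
    have hv2' : ∀ i j, getD2 dpt i j =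
        if i ≤ j ∧ j < n ∧ j - i < 1+t then dVal m Tc Sc (j-i) i else 0 := by
      intro i j
      rw [hv2 i j]
      by_cases h1 : i ≤ j ∧ j < n ∧ j - i ≤ t
      · rw [if_pos h1, if_pos (by omega)]
      · rw [if_neg h1, if_neg (by omega)]
    obtain ⟨_, hs3, hv3⟩ := innerFold m n Tc Sc (1+t) (by omega) (by omega) dpt hs2 hv2'
      (n - (1+t)) le_rfl
    refine ⟨hs3, ?_⟩
    intro i j
    rw [hv3 i j]
    by_cases h1 : i ≤ j ∧ j < n ∧ (j - i < 1+t ∨ (j - i = 1+t ∧ i < n - (1+t)))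
    · rw [if_pos h1, if_pos (by omega)]
    · rw [if_neg h1, if_neg (by omega)]

-- ===== B-side machinery: potential function, memo invariant, stack invariant =====

-- weight of one frame: 1 once its cell is memoized or it is a resolve frame, else 3·2^(j-i) − 2
def wtB (memo : PySem.Dict (Nat × Nat) Int) (fr : Nat × Nat × Bool) : Nat :=
  if memo.contains (fr.1, fr.2.1) then 1 else if fr.2.2 then 1 else 3 * 2 ^ (fr.2.1 - fr.1) - 2

def PhiB (memo : PySem.Dict (Nat × Nat) Int) (stack : List (Nat × Nat × Bool)) : Nat :=
  (stack.map (wtB memo)).sum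

-- every memo entry carries the mathematical value of its cell
def InvB (m : Nat) (Tc Sc : List Char) (memo : PySem.Dict (Nat × Nat) Int) : Prop :=
  ∀ i j v, memo.get? (i, j) = some v → v = dVal m Tc Sc (j - i) i

def MemoLe (memo memo' : PySem.Dict (Nat × Nat) Int) : Prop :=
  ∀ c : Nat × Nat, memo.contains c = true → memo'.contains c = true

def CoversB (memo : PySem.Dict (Nat × Nat) Int) (ab : List (Nat × Nat)) (c : Nat × Nat) : Prop :=
  memo.contains c = true ∨ c ∈ ab

-- every resolve frame finds each child it will read either memoized or above itself
def StackOkB (m : Nat) (Tc Sc : List Char) (memo : PySem.Dict (Nat × Nat) Int) :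
    List (Nat × Nat) → List (Nat × Nat × Bool) → Prop
  | _, [] => True
  | ab, (i, j, resolve) :: rest =>
      (resolve = true →
        ((m ≤ i ∨ Sc.getD (j - i) ' ' = Tc.getD i ' ') → CoversB memo ab (i + 1, j)) ∧
        ((m ≤ j ∨ Sc.getD (j - i) ' ' = Tc.getD j ' ') → CoversB memo ab (i, j - 1))) ∧
      StackOkB m Tc Sc memo ((i, j) :: ab) rest

lemma wtB_pos (memo : PySem.Dict (Nat × Nat) Int) (fr : Nat × Nat × Bool) : 1 ≤ wtB memo fr := by
  unfold wtB
  split_ifs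
  · omega
  · omega
  · have : 1 ≤ 2 ^ (fr.2.1 - fr.1) := Nat.one_le_two_pow
    omega

lemma wtB_mono {memo memo' : PySem.Dict (Nat × Nat) Int} (h : MemoLe memo memo')
    (fr : Nat × Nat × Bool) : wtB memo' fr ≤ wtB memo fr := by
  unfold wtB
  by_cases h1 : memo.contains (fr.1, fr.2.1)
  · rw [if_pos h1, if_pos (h _ h1)]
  · rw [if_neg h1]
    by_cases h2 : memo'.contains (fr.1, fr.2.1) = true
    · rw [if_pos h2]
      split_ifs
      · omega
      · have : 1 ≤ 2 ^ (fr.2.1 - fr.1) := Nat.one_le_two_pow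
        omega
    · rw [if_neg h2]

lemma PhiB_mono {memo memo' : PySem.Dict (Nat × Nat) Int} (h : MemoLe memo memo')
    (stack : List (Nat × Nat × Bool)) : PhiB memo' stack ≤ PhiB memo stack := by
  unfold PhiB
  induction stack with
  | nil => simp
  | cons fr rest ih =>
    simp only [List.map_cons, List.sum_cons]
    exact Nat.add_le_add (wtB_mono h fr) ih

lemma memoLe_refl (memo : PySem.Dict (Nat × Nat) Int) : MemoLe memo memo := fun _ h => h

lemma memoLe_insert (memo : PySem.Dict (Nat × Nat) Int) (c : Nat × Nat) (v : Int) :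
    MemoLe memo (memo.insert c v) := by
  intro c' h
  rw [PySem.Dict.contains_insert]
  simp [h]

lemma memoLe_trans {a b c : PySem.Dict (Nat × Nat) Int} (h1 : MemoLe a b) (h2 : MemoLe b c) :
    MemoLe a c := fun x h => h2 x (h1 x h)

lemma stackOkB_mono {m : Nat} {Tc Sc : List Char} {memo memo' : PySem.Dict (Nat × Nat) Int}
    {ab ab' : List (Nat × Nat)}
    (h : ∀ c, CoversB memo ab c → CoversB memo' ab' c) :
    ∀ {stack : List (Nat × Nat × Bool)}, StackOkB m Tc Sc memo ab stack →
      StackOkB m Tc Sc memo' ab' stack := by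
  intro stack
  induction stack generalizing ab ab' with
  | nil => intro _; trivial
  | cons fr rest ih =>
    obtain ⟨i, j, resolve⟩ := fr
    intro hok
    obtain ⟨h1, h2⟩ := hok
    refine ⟨?_, ?_⟩
    · intro hr
      obtain ⟨ha, hb⟩ := h1 hr
      exact ⟨fun hc => h _ (ha hc), fun hc => h _ (hb hc)⟩
    · refine ih (ab := (i, j) :: ab) (ab' := (i, j) :: ab') ?_ h2
      intro c hc
      rcases hc with hc | hc
      · rcases h c (Or.inl hc) with hh | hh
        · exact Or.inl hh
        · exact Or.inr (List.mem_cons_of_mem _ hh)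
      · rcases List.mem_cons.1 hc with rfl | hc
        · exact Or.inr (List.mem_cons_self)
        · rcases h c (Or.inr hc) with hh | hh
          · exact Or.inl hh
          · exact Or.inr (List.mem_cons_of_mem _ hh)

lemma invB_insert {m : Nat} {Tc Sc : List Char} {memo : PySem.Dict (Nat × Nat) Int}
    (hinv : InvB m Tc Sc memo) (i j : Nat) (v : Int) (hv : v = dVal m Tc Sc (j - i) i) :
    InvB m Tc Sc (memo.insert (i, j) v) := by
  intro i' j' v' h
  rw [PySem.Dict.get?_insert] at h
  split_ifs at h with he
  · obtain ⟨rfl, rfl⟩ := Prod.mk.injEq .. ▸ (by exact Prod.ext_iff.1 he : i' = i ∧ j' = j)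
    cases h
    exact hv
  · exact hinv i' j' v' h

-- the machine: with enough fuel it preserves the memo invariant, grows the memo,
-- and memoizes the cell of every frame on the stack
lemma bRun_good (m : Nat) (Tc Sc : List Char) :
    ∀ (fuel : Nat) (stack : List (Nat × Nat × Bool)) (memo : PySem.Dict (Nat × Nat) Int),
      PhiB memo stack ≤ fuel →
      (∀ fr ∈ stack, fr.1 ≤ fr.2.1) →
      InvB m Tc Sc memo →
      StackOkB m Tc Sc memo [] stack →
      InvB m Tc Sc (bRun m Tc Sc fuel stack memo) ∧
      MemoLe memo (bRun m Tc Sc fuel stack memo) ∧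
      ∀ fr ∈ stack, (bRun m Tc Sc fuel stack memo).contains (fr.1, fr.2.1) = true := by
  intro fuel
  induction fuel with
  | zero =>
    intro stack memo hphi hwf hinv hok
    cases stack with
    | nil =>
      exact ⟨by simpa [bRun] using hinv, by simpa [bRun] using memoLe_refl memo, by simp⟩
    | cons fr rest =>
      exfalso
      have := wtB_pos memo fr
      simp only [PhiB, List.map_cons, List.sum_cons] at hphi
      omega
  | succ f ih =>
    intro stack memo hphi hwf hinv hok
    cases stack with
    | nil =>
      exact ⟨by simpa [bRun] using hinv, by simpa [bRun] using memoLe_refl memo, by simp⟩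
    | cons fr rest =>
      obtain ⟨i, j, resolve⟩ := fr
      obtain ⟨hok1, hok2⟩ := hok
      have hphi' : wtB memo (i, j, resolve) + PhiB memo rest ≤ f + 1 := by
        simpa [PhiB] using hphi
      have hw1 := wtB_pos memo (i, j, resolve)
      by_cases hc : memo.contains (i, j) = true
      -- memo hit: pop
      · have hstep : bRun m Tc Sc (f+1) ((i,j,resolve) :: rest) memo = bRun m Tc Sc f rest memo := by
          simp [bRun, hc]
        have hok' : StackOkB m Tc Sc memo [] rest := by
          refine stackOkB_mono ?_ hok2
          intro c hcov
          rcases hcov with h | h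
          · exact Or.inl h
          · rcases List.mem_cons.1 h with rfl | h
            · exact Or.inl hc
            · exact absurd h (List.not_mem_nil)
        obtain ⟨r1, r2, r3⟩ := ih rest memo (by omega) (fun fr h => hwf fr (List.mem_cons_of_mem _ h))
          hinv hok'
        rw [hstep]
        refine ⟨r1, r2, ?_⟩
        intro fr hfr
        rcases List.mem_cons.1 hfr with rfl | hfr
        · exact r2 _ hc
        · exact r3 fr hfr
      · by_cases hij : i = j
        -- base cell: store and pop
        · subst hij
          have hstep : bRun m Tc Sc (f+1) ((i,i,resolve) :: rest) memo =
              bRun m Tc Sc f rest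
                (memo.insert (i, i) (if m ≤ i ∨ Tc.getD i ' ' = Sc.getD 0 ' ' then 2 else 0)) := by
            simp [bRun, hc]
          set memo' := memo.insert (i, i)
            (if m ≤ i ∨ Tc.getD i ' ' = Sc.getD 0 ' ' then 2 else 0) with hm'
          have hle : MemoLe memo memo' := memoLe_insert _ _ _
          have hinv' : InvB m Tc Sc memo' := by
            refine invB_insert hinv i i _ ?_
            simp only [Nat.sub_self, dVal]
          have hok' : StackOkB m Tc Sc memo' [] rest := by
            refine stackOkB_mono ?_ hok2
            intro c hcov
            rcases hcov with h | h
            · exact Or.inl (hle _ h)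
            · rcases List.mem_cons.1 h with rfl | h
              · refine Or.inl ?_
                rw [hm', PySem.Dict.contains_insert]
                simp
              · exact absurd h (List.not_mem_nil)
          obtain ⟨r1, r2, r3⟩ := ih rest memo'
            (le_trans (PhiB_mono hle rest) (by omega))
            (fun fr h => hwf fr (List.mem_cons_of_mem _ h)) hinv' hok'
          rw [hstep]
          refine ⟨r1, memoLe_trans hle r2, ?_⟩
          intro fr hfr
          rcases List.mem_cons.1 hfr with rfl | hfr
          · refine r2 _ ?_
            rw [hm', PySem.Dict.contains_insert]
            simp
          · exact r3 fr hfr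
        -- i ≠ j
        · have hij' : i < j := by
            have := hwf (i, j, resolve) List.mem_cons_self
            simp at this
            omega
          by_cases hres : resolve = false
          -- expand: push resolve frame and missing children
          · subst hres
            set c := Sc.getD (j - i) ' ' with hcdef
            set newstack :=
              ((if m ≤ j ∨ c = Tc.getD j ' ' then [(i, j - 1, false)] else []) ++
               (if m ≤ i ∨ c = Tc.getD i ' ' then [(i + 1, j, false)] else []) ++
               (i, j, true) :: rest) with hns
            have hstep : bRun m Tc Sc (f+1) ((i,j,false) :: rest) memo =
                bRun m Tc Sc f newstack memo := by
              simp only [bRun, hc, Bool.false_eq_true, if_false, hij]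
              rfl
            -- Phi decreases strictly
            have hwold : wtB memo (i, j, false) = 3 * 2 ^ (j - i) - 2 := by
              show (if memo.contains (i, j) = true then 1
                else if false = true then 1 else 3 * 2 ^ (j - i) - 2) = 3 * 2 ^ (j - i) - 2
              rw [if_neg hc, if_neg Bool.false_ne_true]
            have hphnew : PhiB memo newstack ≤ f := by
              have hpow : 2 ^ (j - i) = 2 * 2 ^ (j - i - 1) := by
                rw [← pow_succ']
                congr 1
                omega
              have h1le : 1 ≤ 2 ^ (j - i - 1) := Nat.one_le_two_pow
              have wchild1 : wtB memo (i, j - 1, false) ≤ 3 * 2 ^ (j - i - 1) - 2 := by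
                show (if memo.contains (i, j - 1) = true then 1
                  else if false = true then 1 else 3 * 2 ^ (j - 1 - i) - 2) ≤ 3 * 2 ^ (j - i - 1) - 2
                rw [if_neg Bool.false_ne_true, show j - 1 - i = j - i - 1 from by omega]
                split_ifs
                · omega
                · omega
              have wchild2 : wtB memo (i + 1, j, false) ≤ 3 * 2 ^ (j - i - 1) - 2 := by
                show (if memo.contains (i + 1, j) = true then 1
                  else if false = true then 1 else 3 * 2 ^ (j - (i + 1)) - 2) ≤ 3 * 2 ^ (j - i - 1) - 2
                rw [if_neg Bool.false_ne_true, show j - (i + 1) = j - i - 1 from by omega]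
                split_ifs
                · omega
                · omega
              have wres : wtB memo (i, j, true) = 1 := by
                show (if memo.contains (i, j) = true then 1
                  else if true = true then 1 else 3 * 2 ^ (j - i) - 2) = 1
                rw [if_neg hc, if_pos rfl]
              have hsplit : PhiB memo newstack =
                  (if m ≤ j ∨ c = Tc.getD j ' ' then wtB memo (i, j - 1, false) else 0) +
                  (if m ≤ i ∨ c = Tc.getD i ' ' then wtB memo (i + 1, j, false) else 0) +
                  wtB memo (i, j, true) + PhiB memo rest := by
                rw [hns]
                unfold PhiB
                split_ifs <;> simp <;> ring
              rw [hsplit, wres]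
              have hb1 : (if m ≤ j ∨ c = Tc.getD j ' ' then wtB memo (i, j - 1, false) else 0) ≤
                  3 * 2 ^ (j - i - 1) - 2 := by
                split_ifs
                · exact wchild1
                · omega
              have hb2 : (if m ≤ i ∨ c = Tc.getD i ' ' then wtB memo (i + 1, j, false) else 0) ≤
                  3 * 2 ^ (j - i - 1) - 2 := by
                split_ifs
                · exact wchild2
                · omega
              rw [hwold] at hphi'
              omega
            have hwfnew : ∀ fr ∈ newstack, fr.1 ≤ fr.2.1 := by
              intro fr hfr
              rw [hns] at hfr
              simp only [List.mem_append, List.mem_cons] at hfr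
              rcases hfr with (h | h) | h | h
              · split_ifs at h <;> simp_all <;> omega
              · split_ifs at h <;> simp_all <;> omega
              · subst h; simp; omega
              · exact hwf fr (List.mem_cons_of_mem _ h)
            have hoknew : StackOkB m Tc Sc memo [] newstack := by
              rw [hns]
              -- peel the optional child frames, then the resolve frame, then transfer rest
              have hrest : ∀ ab : List (Nat × Nat), (i, j) ∈ ab →
                  StackOkB m Tc Sc memo ab rest := by
                intro ab hab
                refine stackOkB_mono ?_ hok2
                intro cc hcov
                rcases hcov with h | h
                · exact Or.inl h
                · rcases List.mem_cons.1 h with rfl | h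
                  · exact Or.inr hab
                  · simp at h
              by_cases h1 : m ≤ j ∨ c = Tc.getD j ' '
              · by_cases h2 : m ≤ i ∨ c = Tc.getD i ' '
                · rw [if_pos h1, if_pos h2]
                  exact ⟨fun hh => absurd hh Bool.false_ne_true,
                    fun hh => absurd hh Bool.false_ne_true,
                    fun _ => ⟨fun _ => Or.inr (by simp), fun _ => Or.inr (by simp)⟩,
                    hrest _ (by simp)⟩
                · rw [if_pos h1, if_neg h2]
                  exact ⟨fun hh => absurd hh Bool.false_ne_true,
                    fun _ => ⟨fun hcc => absurd hcc h2, fun _ => Or.inr (by simp)⟩,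
                    hrest _ (by simp)⟩
              · by_cases h2 : m ≤ i ∨ c = Tc.getD i ' '
                · rw [if_neg h1, if_pos h2]
                  exact ⟨fun hh => absurd hh Bool.false_ne_true,
                    fun _ => ⟨fun _ => Or.inr (by simp), fun hcc => absurd hcc h1⟩,
                    hrest _ (by simp)⟩
                · rw [if_neg h1, if_neg h2]
                  exact ⟨fun _ => ⟨fun hcc => absurd hcc h2, fun hcc => absurd hcc h1⟩,
                    hrest _ (by simp)⟩
            obtain ⟨r1, r2, r3⟩ := ih newstack memo hphnew hwfnew hinv hoknew
            rw [hstep]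
            refine ⟨r1, r2, ?_⟩
            intro fr hfr
            rcases List.mem_cons.1 hfr with rfl | hfr
            · exact r3 (i, j, true) (by rw [hns]; simp)
            · exact r3 fr (by rw [hns]; simp [hfr])
          -- resolve: children are memoized, store the combined value, pop
          · have hres' : resolve = true := by
              cases resolve
              · exact absurd rfl hres
              · rfl
            subst hres'
            set c := Sc.getD (j - i) ' ' with hcdef
            set v := ((if m ≤ i ∨ c = Tc.getD i ' ' then memo.getD (i + 1, j) 0 else 0) +
                      (if m ≤ j ∨ c = Tc.getD j ' ' then memo.getD (i, j - 1) 0 else 0)) with hv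
            have hstep : bRun m Tc Sc (f+1) ((i,j,true) :: rest) memo =
                bRun m Tc Sc f rest (memo.insert (i, j) v) := by
              simp only [bRun, hc, hij, Bool.false_eq_true, if_false]
              rfl
            -- the stored value is dVal
            have hchild : ∀ (cc : Nat × Nat),
                ((m ≤ cc.1 ∨ False) → True) := by intro _ _; trivial
            obtain ⟨ha, hb⟩ := hok1 rfl
            have hval : v = dVal m Tc Sc (j - i) i := by
              obtain ⟨k', hk'⟩ : ∃ k', j - i = k' + 1 := ⟨j - i - 1, by omega⟩
              have hj : j = i + (k' + 1) := by omega
              have e1 : (m ≤ i ∨ c = Tc.getD i ' ') →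
                  memo.getD (i + 1, j) 0 = dVal m Tc Sc k' (i + 1) := by
                intro hcc
                rcases ha hcc with hmem | habs
                · have hsome : (memo.get? (i + 1, j)).isSome = true := by
                    rw [← PySem.Dict.contains_eq_isSome_get?]; exact hmem
                  obtain ⟨w, hw⟩ := Option.isSome_iff_exists.mp hsome
                  rw [PySem.Dict.getD_eq_get?_getD, hw]
                  have := hinv (i + 1) j w hw
                  simp only [Option.getD_some, this]
                  congr 1
                  omega
                · simp at habs
              have e2 : (m ≤ j ∨ c = Tc.getD j ' ') →
                  memo.getD (i, j - 1) 0 = dVal m Tc Sc k' i := by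
                intro hcc
                rcases hb hcc with hmem | habs
                · have hsome : (memo.get? (i, j - 1)).isSome = true := by
                    rw [← PySem.Dict.contains_eq_isSome_get?]; exact hmem
                  obtain ⟨w, hw⟩ := Option.isSome_iff_exists.mp hsome
                  rw [PySem.Dict.getD_eq_get?_getD, hw]
                  have := hinv i (j - 1) w hw
                  simp only [Option.getD_some, this]
                  congr 1
                  omega
                · simp at habs
              rw [hv, hk']
              simp only [dVal]
              have hcS : c = Sc.getD (k' + 1) ' ' := by rw [hcdef, hk']
              have hcc1 : (m ≤ i ∨ Sc.getD (k' + 1) ' ' = Tc.getD i ' ') ↔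
                  (m ≤ i ∨ c = Tc.getD i ' ') := by rw [hcS]
              have hcc2 : (m ≤ i + (k' + 1) ∨
                    Sc.getD (k' + 1) ' ' = Tc.getD (i + (k' + 1)) ' ') ↔
                  (m ≤ j ∨ c = Tc.getD j ' ') := by rw [hcS, ← hj]
              congr 1
              · by_cases hcc : m ≤ i ∨ c = Tc.getD i ' '
                · rw [if_pos hcc, if_pos (hcc1.mpr hcc), e1 hcc]
                · rw [if_neg hcc, if_neg (fun hx => hcc (hcc1.mp hx))]
              · by_cases hcc : m ≤ j ∨ c = Tc.getD j ' '
                · rw [if_pos hcc, if_pos (hcc2.mpr hcc), e2 hcc]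
                · rw [if_neg hcc, if_neg (fun hx => hcc (hcc2.mp hx))]
            set memo' := memo.insert (i, j) v with hm'
            have hle : MemoLe memo memo' := memoLe_insert _ _ _
            have hinv' : InvB m Tc Sc memo' := invB_insert hinv i j v hval
            have hok' : StackOkB m Tc Sc memo' [] rest := by
              refine stackOkB_mono ?_ hok2
              intro cc hcov
              rcases hcov with h | h
              · exact Or.inl (hle _ h)
              · rcases List.mem_cons.1 h with rfl | h
                · refine Or.inl ?_
                  rw [hm', PySem.Dict.contains_insert]
                  simp
                · exact absurd h (List.not_mem_nil)
            obtain ⟨r1, r2, r3⟩ := ih rest memo'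
              (le_trans (PhiB_mono hle rest) (by omega))
              (fun fr h => hwf fr (List.mem_cons_of_mem _ h)) hinv' hok'
            rw [hstep]
            refine ⟨r1, memoLe_trans hle r2, ?_⟩
            intro fr hfr
            rcases List.mem_cons.1 hfr with rfl | hfr
            · refine r2 _ ?_
              rw [hm', PySem.Dict.contains_insert]
              simp
            · exact r3 fr hfr

-- ===== VERDICT (by name: the statement is the Claim_ definition above) =====
theorem count_square_dynamic_spec : Claim_equal_count_square_dynamic := by
  intro T S hdom hpre
  unfold Spec_count_square_dynamic count_square_dynamic count_square_dynamic_alt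
  simp only []
  by_cases hmn : T.toList.length > S.toList.length
  · rw [if_pos hmn, if_pos hmn]
  · rw [if_neg hmn, if_neg hmn]
    have hn : 1 ≤ S.toList.length := by
      rcases Nat.eq_zero_or_pos S.toList.length with h0 | h
      · exfalso
        refine hpre ⟨?_, ?_⟩
        · rw [← String.toList_eq_nil_iff]
          have : T.toList.length = 0 := by omega
          exact List.length_eq_zero_iff.1 this
        · rw [← String.toList_eq_nil_iff]
          exact List.length_eq_zero_iff.1 h0
      · exact h
    set m := T.toList.length
    set n := S.toList.length
    -- A's side: the table holds dVal everywhere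
    obtain ⟨hsB, hvB⟩ := baseFold m n T.toList S.toList n le_rfl
    obtain ⟨hs2, hv2⟩ := outerFold m n T.toList S.toList _ hsB hvB (n - 1) le_rfl
    -- B's side: the machine memoizes dVal at the root
    have hphi : PhiB PySem.Dict.empty [(0, n - 1, false)] ≤ 3 * 2 ^ (n - 1) := by
      unfold PhiB wtB
      simp [PySem.Dict.contains_empty]
    obtain ⟨r1, _, r3⟩ := bRun_good m T.toList S.toList (3 * 2 ^ (n - 1))
      [(0, n - 1, false)] PySem.Dict.empty hphi
      (by
        rintro fr hfr
        rcases List.mem_cons.1 hfr with rfl | h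
        · exact Nat.zero_le _
        · exact absurd h List.not_mem_nil)
      (by intro i j v h; rw [PySem.Dict.get?_empty] at h; cases h)
      ⟨fun hh => absurd hh Bool.false_ne_true, trivial⟩
    have hcont := r3 (0, n - 1, false) List.mem_cons_self
    have hsome : ((bRun m T.toList S.toList (3 * 2 ^ (n - 1)) [(0, n - 1, false)]
        PySem.Dict.empty).get? (0, n - 1)).isSome = true := by
      rw [← PySem.Dict.contains_eq_isSome_get?]; exact hcont
    obtain ⟨w, hw⟩ := Option.isSome_iff_exists.mp hsome
    have hwv := r1 0 (n - 1) w hw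
    rw [hv2 0 (n - 1), if_pos (by omega), PySem.Dict.getD_eq_get?_getD, hw]
    simp only [Option.getD_some, hwv, Nat.sub_zero]
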